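-- pv_equiv track=rewrite | github.com/BorisHiltunen/Don-t-Fall | Codes Etc/copy_of_Rahasade.py | ajan_laskenta
-- ===== SOURCE A (Python) =====
-- def ajan_laskenta(luku: int):
--     aika = ""
--     sekunnit = 0
--     minuutit = 0
--     tunnit = 0
--
--     while luku > 0:
--         luku -= 1
--         sekunnit += 1
--         if sekunnit == 60:
--             sekunnit = 0
--             minuutit += 1
--             if minuutit == 60:
--                 minuutit = 0
--                 tunnit += 1
--                 if tunnit == 24:
--                     tunnit = 0
--
--     if tunnit < 10:
--         if minuutit < 10:
--             if sekunnit < 10: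
--                 aika = f"0{tunnit}:0{minuutit}:0{sekunnit}"
--             else:
--                 aika = f"0{tunnit}:0{minuutit}:{sekunnit}"
--         else:
--             if sekunnit < 10:
--                 aika = f"0{tunnit}:{minuutit}:0{sekunnit}"
--             else:
--                 aika = f"0{tunnit}:{minuutit}:{sekunnit}"
--     else:
--         if minuutit < 10:
--             if sekunnit < 10:
--                 aika = f"{tunnit}:0{minuutit}:0{sekunnit}"
--             else:
--                 aika = f"{tunnit}:0{minuutit}:{sekunnit}"
--         else:
--             if sekunnit < 10:
--                 aika = f"{tunnit}:{minuutit}:0{sekunnit}"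
--             else:
--                 aika = f"{tunnit}:{minuutit}:{sekunnit}"
--
--     return aika
-- ===== SOURCE B (Python) =====
-- def ajan_laskenta(luku: int):
--     t = max(luku, 0) % 86400
--     tunnit, r = divmod(t, 3600)
--     minuutit, sekunnit = divmod(r, 60)
--     return f"{tunnit:02d}:{minuutit:02d}:{sekunnit:02d}"
-- ===== Notes on version B (the rewrite author's own statement) =====
-- stated objective: faster
-- what changed: Replaces the second-by-second counting loop (O(luku) iterations with nested wrap checks and a nested padding branch tree) by a single divmod/modulo computation and 02d formatting.
import Mathlib
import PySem

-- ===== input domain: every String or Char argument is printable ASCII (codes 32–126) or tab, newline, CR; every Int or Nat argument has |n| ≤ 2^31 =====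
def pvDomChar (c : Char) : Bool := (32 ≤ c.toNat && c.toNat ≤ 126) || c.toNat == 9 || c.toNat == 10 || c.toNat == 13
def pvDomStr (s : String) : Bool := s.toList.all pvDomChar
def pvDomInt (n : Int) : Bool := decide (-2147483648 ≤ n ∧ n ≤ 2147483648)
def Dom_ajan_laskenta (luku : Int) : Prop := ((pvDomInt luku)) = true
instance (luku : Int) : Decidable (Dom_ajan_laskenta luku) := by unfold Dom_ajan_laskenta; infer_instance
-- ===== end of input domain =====

-- B replaces A's second-by-second counting loop by one O(1) divmod/modulo computation with 02d padding.

-- ===== PORT A =====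
-- A's while-loop: decrement luku, increment seconds, cascade the 60/60/24 wraps.
def pvLoopA (luku s m h : Int) : Int × Int × Int :=
  if luku > 0 then
    let s1 := s + 1
    if s1 = 60 then
      let m1 := m + 1
      if m1 = 60 then
        let h1 := h + 1
        if h1 = 24 then pvLoopA (luku - 1) 0 0 0
        else pvLoopA (luku - 1) 0 0 h1
      else pvLoopA (luku - 1) 0 m1 h
    else pvLoopA (luku - 1) s1 m h
  else (s, m, h)
termination_by luku.toNat
decreasing_by all_goals omega

def ajan_laskenta (luku : Int) : String :=
  let r := pvLoopA luku 0 0 0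
  let sekunnit := r.1
  let minuutit := r.2.1
  let tunnit := r.2.2
  if tunnit < 10 then
    if minuutit < 10 then
      if sekunnit < 10 then
        "0" ++ PySem.Int.toStr tunnit ++ ":0" ++ PySem.Int.toStr minuutit ++ ":0" ++ PySem.Int.toStr sekunnit
      else
        "0" ++ PySem.Int.toStr tunnit ++ ":0" ++ PySem.Int.toStr minuutit ++ ":" ++ PySem.Int.toStr sekunnit
    else
      if sekunnit < 10 then
        "0" ++ PySem.Int.toStr tunnit ++ ":" ++ PySem.Int.toStr minuutit ++ ":0" ++ PySem.Int.toStr sekunnit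
      else
        "0" ++ PySem.Int.toStr tunnit ++ ":" ++ PySem.Int.toStr minuutit ++ ":" ++ PySem.Int.toStr sekunnit
  else
    if minuutit < 10 then
      if sekunnit < 10 then
        PySem.Int.toStr tunnit ++ ":0" ++ PySem.Int.toStr minuutit ++ ":0" ++ PySem.Int.toStr sekunnit
      else
        PySem.Int.toStr tunnit ++ ":0" ++ PySem.Int.toStr minuutit ++ ":" ++ PySem.Int.toStr sekunnit
    else
      if sekunnit < 10 then
        PySem.Int.toStr tunnit ++ ":" ++ PySem.Int.toStr minuutit ++ ":0" ++ PySem.Int.toStr sekunnit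
      else
        PySem.Int.toStr tunnit ++ ":" ++ PySem.Int.toStr minuutit ++ ":" ++ PySem.Int.toStr sekunnit

-- ===== PORT B =====
-- f"{x:02d}" for 0 ≤ x: pad with one leading zero below 10.
def pvPad2 (x : Int) : String := if x < 10 then "0" ++ PySem.Int.toStr x else PySem.Int.toStr x

def ajan_laskenta_alt (luku : Int) : String :=
  let t := PySem.Int.mod (max luku 0) 86400
  let tunnit := PySem.Int.floordiv t 3600
  let r := PySem.Int.mod t 3600
  let minuutit := PySem.Int.floordiv r 60
  let sekunnit := PySem.Int.mod r 60
  pvPad2 tunnit ++ ":" ++ pvPad2 minuutit ++ ":" ++ pvPad2 sekunnit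

-- ===== PRECONDITION & SPEC =====
def Spec_ajan_laskenta (luku : Int) (out : String) : Prop := out = ajan_laskenta_alt luku
instance (luku : Int) (out : String) : Decidable (Spec_ajan_laskenta luku out) := by unfold Spec_ajan_laskenta; infer_instance

-- ===== CLAIM (what is proved, stated in full; the proofs are below) =====
def Claim_equal_ajan_laskenta : Prop := ∀ (luku : Int), Dom_ajan_laskenta luku → Spec_ajan_laskenta luku (ajan_laskenta luku)

-- ===== LEMMAS AND PROOFS =====

-- A's loop run n = luku.toNat times from a well-formed clock state computes the clock of C + n seconds.
theorem pvLoopA_char : ∀ (n : Nat) (luku s m h : Int), luku.toNat = n →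
    0 ≤ s → s < 60 → 0 ≤ m → m < 60 → 0 ≤ h → h < 24 →
    pvLoopA luku s m h =
      ((s + 60*m + 3600*h + n) % 60,
       ((s + 60*m + 3600*h + n) / 60) % 60,
       ((s + 60*m + 3600*h + n) / 3600) % 24) := by
  intro n
  induction n with
  | zero =>
    intro luku s m h hn hs0 hs1 hm0 hm1 hh0 hh1
    rw [pvLoopA, if_neg (by omega)]
    refine Prod.ext ?_ (Prod.ext ?_ ?_) <;> simp <;> omega
  | succ k ih =>
    intro luku s m h hn hs0 hs1 hm0 hm1 hh0 hh1
    rw [pvLoopA, if_pos (by omega)]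
    simp only
    split_ifs with h1 h2 h3
    · rw [ih (luku - 1) 0 0 0 (by omega) (by omega) (by omega) (by omega) (by omega) (by omega) (by omega)]
      refine Prod.ext ?_ (Prod.ext ?_ ?_) <;> simp <;> omega
    · rw [ih (luku - 1) 0 0 (h + 1) (by omega) (by omega) (by omega) (by omega) (by omega) (by omega) (by omega)]
      refine Prod.ext ?_ (Prod.ext ?_ ?_) <;> simp <;> omega
    · rw [ih (luku - 1) 0 (m + 1) h (by omega) (by omega) (by omega) (by omega) (by omega) (by omega) (by omega)]
      refine Prod.ext ?_ (Prod.ext ?_ ?_) <;> simp <;> omega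
    · rw [ih (luku - 1) (s + 1) m h (by omega) (by omega) (by omega) (by omega) (by omega) (by omega) (by omega)]
      refine Prod.ext ?_ (Prod.ext ?_ ?_) <;> simp <;> omega

-- A's 8-branch padding tree equals pad2:pad2:pad2 once the fields are in clock range.
theorem pvFormat_eq (s m h : Int) :
    (if h < 10 then
      if m < 10 then
        if s < 10 then "0" ++ PySem.Int.toStr h ++ ":0" ++ PySem.Int.toStr m ++ ":0" ++ PySem.Int.toStr s
        else "0" ++ PySem.Int.toStr h ++ ":0" ++ PySem.Int.toStr m ++ ":" ++ PySem.Int.toStr s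
      else
        if s < 10 then "0" ++ PySem.Int.toStr h ++ ":" ++ PySem.Int.toStr m ++ ":0" ++ PySem.Int.toStr s
        else "0" ++ PySem.Int.toStr h ++ ":" ++ PySem.Int.toStr m ++ ":" ++ PySem.Int.toStr s
    else
      if m < 10 then
        if s < 10 then PySem.Int.toStr h ++ ":0" ++ PySem.Int.toStr m ++ ":0" ++ PySem.Int.toStr s
        else PySem.Int.toStr h ++ ":0" ++ PySem.Int.toStr m ++ ":" ++ PySem.Int.toStr s
      else
        if s < 10 then PySem.Int.toStr h ++ ":" ++ PySem.Int.toStr m ++ ":0" ++ PySem.Int.toStr s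
        else PySem.Int.toStr h ++ ":" ++ PySem.Int.toStr m ++ ":" ++ PySem.Int.toStr s) =
    pvPad2 h ++ ":" ++ pvPad2 m ++ ":" ++ pvPad2 s := by
  unfold pvPad2
  split_ifs <;> (apply String.ext; simp)

theorem ajan_laskenta_eq (luku : Int) : ajan_laskenta luku = ajan_laskenta_alt luku := by
  unfold ajan_laskenta ajan_laskenta_alt
  rw [pvLoopA_char luku.toNat luku 0 0 0 rfl (by omega) (by omega) (by omega) (by omega) (by omega) (by omega)]
  simp only
  rw [pvFormat_eq]
  have hmax : max luku 0 = (luku.toNat : Int) := by omega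
  rw [hmax]
  have h1 : PySem.Int.mod (luku.toNat : Int) 86400 = (luku.toNat : Int) % 86400 :=
    PySem.Int.mod_eq_emod_of_pos (by norm_num)
  rw [h1]
  have h2 : PySem.Int.floordiv ((luku.toNat : Int) % 86400) 3600 = ((luku.toNat : Int) % 86400) / 3600 :=
    PySem.Int.floordiv_eq_ediv_of_pos (by norm_num)
  have h3 : PySem.Int.mod ((luku.toNat : Int) % 86400) 3600 = ((luku.toNat : Int) % 86400) % 3600 :=
    PySem.Int.mod_eq_emod_of_pos (by norm_num)
  rw [h2, h3]
  have h4 : PySem.Int.floordiv (((luku.toNat : Int) % 86400) % 3600) 60 = (((luku.toNat : Int) % 86400) % 3600) / 60 :=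
    PySem.Int.floordiv_eq_ediv_of_pos (by norm_num)
  have h5 : PySem.Int.mod (((luku.toNat : Int) % 86400) % 3600) 60 = (((luku.toNat : Int) % 86400) % 3600) % 60 :=
    PySem.Int.mod_eq_emod_of_pos (by norm_num)
  rw [h4, h5]
  have eh : ((0 : Int) + 60*0 + 3600*0 + luku.toNat) / 3600 % 24 = ((luku.toNat : Int) % 86400) / 3600 := by omega
  have em : ((0 : Int) + 60*0 + 3600*0 + luku.toNat) / 60 % 60 = (((luku.toNat : Int) % 86400) % 3600) / 60 := by omega
  have es : ((0 : Int) + 60*0 + 3600*0 + luku.toNat) % 60 = (((luku.toNat : Int) % 86400) % 3600) % 60 := by omega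
  rw [eh, em, es]

-- ===== VERDICT (by name: the statement is the Claim_ definition above) =====
theorem ajan_laskenta_spec : Claim_equal_ajan_laskenta := by
  intro luku _
  exact ajan_laskenta_eq luku
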